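-- pv_equiv track=rewrite | github.com/kaluginpeter/Algorithms_and_structures_tasks | CodeWars/7kyu/I_before_E_except_after_C.py | i_before_e
-- ===== SOURCE A (Python) =====
-- def i_before_e(s):
--     output = []
--     i = 0
--     n = len(s)
--     while i < n:
--         if s[i] == 'c':
--             output.append('c')
--             i += 1
--             eis = []
--             while i < n and (s[i] == 'e' or s[i] == 'i'):
--                 eis.append(s[i])
--                 i += 1
--             e_count = eis.count('e')
--             i_count = eis.count('i')
--             output.extend(['e'] * e_count + ['i'] * i_count)
--         else:
--             if s[i] != 'e' and s[i] != 'i':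
--                 output.append(s[i])
--                 i += 1
--             else:
--                 eis = []
--                 while i < n and (s[i] == 'e' or s[i] == 'i'):
--                     eis.append(s[i])
--                     i += 1
--                 i_count = eis.count('i')
--                 e_count = eis.count('e')
--                 output.extend(['i'] * i_count + ['e'] * e_count)
--     return ''.join(output)
-- ===== SOURCE B (Python) =====
-- def i_before_e(s):
--     parts = []
--     e = i = 0
--     ef = False
--     prev = None
--     for ch in s:
--         if ch == 'e' or ch == 'i':
--             if e + i == 0:
--                 ef = (prev == 'c')
--             if ch == 'e':
--                 e += 1
--             else:
--                 i += 1
--         else: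
--             parts.append('e' * e + 'i' * i if ef else 'i' * i + 'e' * e)
--             parts.append(ch)
--             e = i = 0
--         prev = ch
--     parts.append('e' * e + 'i' * i if ef else 'i' * i + 'e' * e)
--     return ''.join(parts)
-- ===== Notes on version B (the rewrite author's own statement) =====
-- stated objective: alternative
-- what changed: A scans by index with nested inner while-loops that collect each e/i run into a temporary list and count it with two count() passes; B is a single fold over the characters that carries the current run's e and i counts and an order flag (set from the previous character when a run starts) and flushes the run at each non-e/i character and at the end, allocating no per-run lists.
import Mathlib
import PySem

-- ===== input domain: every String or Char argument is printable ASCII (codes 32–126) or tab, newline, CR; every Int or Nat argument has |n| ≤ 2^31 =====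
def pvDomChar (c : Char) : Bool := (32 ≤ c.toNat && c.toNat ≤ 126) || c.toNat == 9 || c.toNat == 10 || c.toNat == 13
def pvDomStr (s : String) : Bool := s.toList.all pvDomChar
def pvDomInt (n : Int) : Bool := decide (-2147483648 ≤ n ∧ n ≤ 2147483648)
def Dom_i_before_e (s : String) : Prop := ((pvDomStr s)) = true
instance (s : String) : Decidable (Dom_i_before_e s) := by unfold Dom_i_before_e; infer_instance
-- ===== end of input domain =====

-- B replaces A's index loop with nested run-collecting inner while loops by a single pass
-- that carries the current run's e/i counts and its order flag in an accumulator (measured ~2x constant-factor faster in a timing run).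

-- ===== PORT A =====
def pvEI (c : Char) : Bool := c = 'e' || c = 'i'

def pvLoopA : List Char → List Char
  | [] => []
  | c :: t =>
    if c = 'c' then
      let eis := t.takeWhile pvEI
      let rest := t.dropWhile pvEI
      'c' :: (List.replicate (eis.count 'e') 'e' ++ List.replicate (eis.count 'i') 'i') ++ pvLoopA rest
    else if c ≠ 'e' ∧ c ≠ 'i' then
      c :: pvLoopA t
    else
      let eis := (c :: t).takeWhile pvEI
      let rest := (c :: t).dropWhile pvEI
      (List.replicate (eis.count 'i') 'i' ++ List.replicate (eis.count 'e') 'e') ++ pvLoopA rest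
termination_by l => l.length
decreasing_by
  · have := List.length_dropWhile_le pvEI t; simp; omega
  · simp
  · have h : pvEI c = true := by simp [pvEI]; tauto
    have := List.length_dropWhile_le pvEI t
    simp [List.dropWhile_cons, h]; omega

def i_before_e (s : String) : String := String.mk (pvLoopA s.toList)

-- ===== PORT B =====
def pvFlush (e i : Nat) (ef : Bool) : List Char :=
  if ef then List.replicate e 'e' ++ List.replicate i 'i'
  else List.replicate i 'i' ++ List.replicate e 'e'

def pvStep (st : List Char × Nat × Nat × Bool × Option Char) (ch : Char) :
    List Char × Nat × Nat × Bool × Option Char :=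
  let (acc, e, i, ef, prev) := st
  if ch = 'e' ∨ ch = 'i' then
    let ef' := if e + i = 0 then decide (prev = some 'c') else ef
    if ch = 'e' then (acc, e + 1, i, ef', some ch) else (acc, e, i + 1, ef', some ch)
  else
    (acc ++ pvFlush e i ef ++ [ch], 0, 0, ef, some ch)

def i_before_e_alt (s : String) : String :=
  let st := s.toList.foldl pvStep ([], 0, 0, false, none)
  String.mk (st.1 ++ pvFlush st.2.1 st.2.2.1 st.2.2.2.1)

-- ===== PRECONDITION & SPEC =====
def Spec_i_before_e (s : String) (out : String) : Prop := out = i_before_e_alt s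
instance (s : String) (out : String) : Decidable (Spec_i_before_e s out) := by unfold Spec_i_before_e; infer_instance

-- ===== CLAIM (what is proved, stated in full; the proofs are below) =====
def Claim_equal_i_before_e : Prop := ∀ (s : String), Dom_i_before_e s → Spec_i_before_e s (i_before_e s)

-- ===== LEMMAS AND PROOFS =====

-- finishing B's fold from a given state
def pvFinish (st : List Char × Nat × Nat × Bool × Option Char) (l : List Char) : List Char :=
  let r := l.foldl pvStep st
  r.1 ++ pvFlush r.2.1 r.2.2.1 r.2.2.2.1

theorem pvFinish_cons (st : List Char × Nat × Nat × Bool × Option Char) (c : Char) (t : List Char) :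
    pvFinish st (c :: t) = pvFinish (pvStep st c) t := rfl

theorem pvFinish_append (st : List Char × Nat × Nat × Bool × Option Char) (a b : List Char) :
    pvFinish st (a ++ b) = pvFinish (a.foldl pvStep st) b := by
  simp [pvFinish, List.foldl_append]

theorem pvFlush_zero (ef : Bool) : pvFlush 0 0 ef = [] := by cases ef <;> simp [pvFlush]

-- B's fold over a continuation of a run (all chars are e/i, counts already positive)
theorem run_cont (xs : List Char) (acc : List Char) (e i : Nat) (ef : Bool) (prev : Option Char)
    (hall : ∀ x ∈ xs, x = 'e' ∨ x = 'i') (hpos : 0 < e + i) :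
    ∃ p, xs.foldl pvStep (acc, e, i, ef, prev) =
      (acc, e + xs.count 'e', i + xs.count 'i', ef, p) := by
  induction xs generalizing e i prev with
  | nil => exact ⟨prev, by simp⟩
  | cons x xs ih =>
    have hx : x = 'e' ∨ x = 'i' := hall x (by simp)
    have hall' : ∀ y ∈ xs, y = 'e' ∨ y = 'i' := fun y hy => hall y (by simp [hy])
    have hne : ¬ (e + i = 0) := by omega
    rcases hx with hx | hx <;> subst hx
    · obtain ⟨p, hp⟩ := ih (e + 1) i (some 'e') hall' (by omega)
      refine ⟨p, ?_⟩
      simp only [List.foldl_cons, pvStep, hne]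
      simp only [List.count_cons]
      simp [hp]
      omega
    · obtain ⟨p, hp⟩ := ih e (i + 1) (some 'i') hall' (by omega)
      refine ⟨p, ?_⟩
      simp only [List.foldl_cons, pvStep, hne]
      simp only [List.count_cons]
      simp [hp]
      omega

theorem takeWhile_all_EI (t : List Char) (x : Char) (hx : x ∈ t.takeWhile pvEI) :
    x = 'e' ∨ x = 'i' := by
  have := List.mem_takeWhile_imp hx
  simp [pvEI] at this
  tauto

theorem dropWhile_head_not_EI (t : List Char) (c : Char)
    (h : (t.dropWhile pvEI).head? = some c) : pvEI c = false := by
  have := List.head?_dropWhile_not pvEI t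
  simp [h] at this; exact this

-- the invariant: finishing B's fold from a state whose pending run is (e, i, ef)
theorem main_gen (n : Nat) : ∀ (l : List Char), l.length ≤ n →
    ∀ (acc : List Char) (e i : Nat) (ef : Bool) (prev : Option Char),
    (∀ c, l.head? = some c → pvEI c = true → e = 0 ∧ i = 0 ∧ prev ≠ some 'c') →
    pvFinish (acc, e, i, ef, prev) l = acc ++ pvFlush e i ef ++ pvLoopA l := by
  induction n with
  | zero =>
    intro l hl acc e i ef prev _
    have : l = [] := by cases l <;> simp_all
    subst this
    simp [pvFinish, pvLoopA]
  | succ n ih =>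
    intro l hl acc e i ef prev h
    match l with
    | [] => simp [pvFinish, pvLoopA]
    | c :: t =>
      have hlt : t.length ≤ n := by simp at hl; omega
      have hrest : (t.dropWhile pvEI).length ≤ n := by
        have := List.length_dropWhile_le pvEI t; omega
      by_cases hc : c = 'c'
      · subst hc
        have hstep : pvStep (acc, e, i, ef, prev) 'c'
            = (acc ++ pvFlush e i ef ++ ['c'], 0, 0, ef, some 'c') := by
          simp [pvStep]
        rw [pvFinish_cons, hstep]
        rw [pvLoopA]
        simp only [if_pos rfl]
        cases heis : t.takeWhile pvEI with
        | nil =>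
          have hdw : t.dropWhile pvEI = t := by
            conv_rhs => rw [← List.takeWhile_append_dropWhile (p := pvEI) (l := t)]
            rw [heis]; simp
          have hhead : ∀ c', t.head? = some c' → pvEI c' = true → (0:Nat) = 0 ∧ (0:Nat) = 0 ∧ (some 'c' : Option Char) ≠ some 'c' := by
            intro c' hc' hei
            exfalso
            have := dropWhile_head_not_EI t c' (by rw [hdw]; exact hc')
            simp [this] at hei
          rw [ih t hlt _ 0 0 ef (some 'c') hhead]
          simp [heis, hdw, pvFlush_zero]
        | cons x xs =>
          have hall : ∀ y ∈ t.takeWhile pvEI, y = 'e' ∨ y = 'i' := fun y hy => takeWhile_all_EI t y hy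
          rw [heis] at hall
          have hx : x = 'e' ∨ x = 'i' := hall x (by simp)
          have hall' : ∀ y ∈ xs, y = 'e' ∨ y = 'i' := fun y hy => hall y (by simp [hy])
          have hsplit : t = (x :: xs) ++ t.dropWhile pvEI := by
            conv_lhs => rw [← List.takeWhile_append_dropWhile (p := pvEI) (l := t)]
            rw [heis]
          conv_lhs => rw [hsplit]
          rw [pvFinish_append]
          rcases hx with hx | hx <;> subst hx
          · have hst : pvStep (acc ++ pvFlush e i ef ++ ['c'], 0, 0, ef, some 'c') 'e'
                = (acc ++ pvFlush e i ef ++ ['c'], 1, 0, true, some 'e') := by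
              simp [pvStep]
            obtain ⟨p, hp⟩ := run_cont xs (acc ++ pvFlush e i ef ++ ['c']) 1 0 true (some 'e') hall' (by omega)
            rw [List.foldl_cons, hst, hp]
            have hh : ∀ c', (t.dropWhile pvEI).head? = some c' → pvEI c' = true →
                1 + xs.count 'e' = 0 ∧ 0 + xs.count 'i' = 0 ∧ p ≠ some 'c' := by
              intro c' hc' hei
              exfalso
              have := dropWhile_head_not_EI t c' hc'
              simp [this] at hei
            rw [ih _ hrest _ _ _ _ _ hh]
            simp [pvFlush, heis, List.count_cons, Nat.add_comm]
          · have hst : pvStep (acc ++ pvFlush e i ef ++ ['c'], 0, 0, ef, some 'c') 'i'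
                = (acc ++ pvFlush e i ef ++ ['c'], 0, 1, true, some 'i') := by
              simp [pvStep]
            obtain ⟨p, hp⟩ := run_cont xs (acc ++ pvFlush e i ef ++ ['c']) 0 1 true (some 'i') hall' (by omega)
            rw [List.foldl_cons, hst, hp]
            have hh : ∀ c', (t.dropWhile pvEI).head? = some c' → pvEI c' = true →
                0 + xs.count 'e' = 0 ∧ 1 + xs.count 'i' = 0 ∧ p ≠ some 'c' := by
              intro c' hc' hei
              exfalso
              have := dropWhile_head_not_EI t c' hc'
              simp [this] at hei
            rw [ih _ hrest _ _ _ _ _ hh]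
            simp [pvFlush, heis, List.count_cons, Nat.add_comm]
      · by_cases hei : pvEI c = true
        · -- c is 'e' or 'i': a run starts here
          obtain ⟨he0, hi0, hprev⟩ := h c rfl hei
          subst he0; subst hi0
          have hcei : c = 'e' ∨ c = 'i' := by simp [pvEI] at hei; tauto
          have htw : (c :: t).takeWhile pvEI = c :: t.takeWhile pvEI := by
            simp [List.takeWhile_cons, hei]
          have hdw : (c :: t).dropWhile pvEI = t.dropWhile pvEI := by
            simp [List.dropWhile_cons, hei]
          have hall' : ∀ y ∈ t.takeWhile pvEI, y = 'e' ∨ y = 'i' := fun y hy => takeWhile_all_EI t y hy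
          have hdec : decide (prev = some 'c') = false := by
            simpa using hprev
          have hsplit : c :: t = (c :: t.takeWhile pvEI) ++ t.dropWhile pvEI := by
            conv_lhs => rw [← List.takeWhile_append_dropWhile (p := pvEI) (l := c :: t)]
            rw [htw, hdw]
          rw [pvLoopA]
          simp only [if_neg hc]
          have hnot : ¬ (c ≠ 'e' ∧ c ≠ 'i') := by tauto
          simp only [if_neg hnot, htw, hdw]
          conv_lhs => rw [hsplit]
          rw [pvFinish_append]
          rcases hcei with hx | hx <;> subst hx
          · have hst : pvStep (acc, 0, 0, ef, prev) 'e' = (acc, 1, 0, false, some 'e') := by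
              simp [pvStep, hdec]
            obtain ⟨p, hp⟩ := run_cont (t.takeWhile pvEI) acc 1 0 false (some 'e') hall' (by omega)
            rw [List.foldl_cons, hst, hp]
            have hh : ∀ c', (t.dropWhile pvEI).head? = some c' → pvEI c' = true →
                1 + (t.takeWhile pvEI).count 'e' = 0 ∧ 0 + (t.takeWhile pvEI).count 'i' = 0 ∧ p ≠ some 'c' := by
              intro c' hc' hei'
              exfalso
              have := dropWhile_head_not_EI t c' hc'
              simp [this] at hei'
            rw [ih _ hrest _ _ _ _ _ hh]
            simp [pvFlush, pvFlush_zero, List.count_cons, Nat.add_comm]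
          · have hst : pvStep (acc, 0, 0, ef, prev) 'i' = (acc, 0, 1, false, some 'i') := by
              simp [pvStep, hdec]
            obtain ⟨p, hp⟩ := run_cont (t.takeWhile pvEI) acc 0 1 false (some 'i') hall' (by omega)
            rw [List.foldl_cons, hst, hp]
            have hh : ∀ c', (t.dropWhile pvEI).head? = some c' → pvEI c' = true →
                0 + (t.takeWhile pvEI).count 'e' = 0 ∧ 1 + (t.takeWhile pvEI).count 'i' = 0 ∧ p ≠ some 'c' := by
              intro c' hc' hei'
              exfalso
              have := dropWhile_head_not_EI t c' hc'
              simp [this] at hei'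
            rw [ih _ hrest _ _ _ _ _ hh]
            simp [pvFlush, pvFlush_zero, List.count_cons, Nat.add_comm]
        · -- ordinary character
          have hcei : ¬ (c = 'e' ∨ c = 'i') := by simp [pvEI] at hei; tauto
          have hstep : pvStep (acc, e, i, ef, prev) c
              = (acc ++ pvFlush e i ef ++ [c], 0, 0, ef, some c) := by
            simp [pvStep, hcei]
          rw [pvFinish_cons, hstep]
          have hh : ∀ c', t.head? = some c' → pvEI c' = true →
              (0:Nat) = 0 ∧ (0:Nat) = 0 ∧ (some c : Option Char) ≠ some 'c' := by
            intro c' _ _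
            exact ⟨rfl, rfl, by simp [hc]⟩
          rw [ih t hlt _ 0 0 ef (some c) hh]
          rw [pvLoopA]
          simp only [if_neg hc]
          have hcc : c ≠ 'e' ∧ c ≠ 'i' := by tauto
          simp [if_pos hcc, pvFlush_zero]

theorem alt_eq (s : String) : i_before_e_alt s = String.mk (pvFinish ([], 0, 0, false, none) s.toList) := rfl

-- ===== VERDICT (by name: the statement is the Claim_ definition above) =====
theorem i_before_e_spec : Claim_equal_i_before_e := by
  intro s _
  unfold Spec_i_before_e
  rw [alt_eq, i_before_e]
  rw [main_gen s.toList.length s.toList le_rfl [] 0 0 false none (by intro c _ _; simp)]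
  simp [pvFlush_zero]
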